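-- pv_equiv track=rewrite | github.com/inkedpad/MMM_Robyn_Pyspark | Robyn_pyspark_innerfolder/Codes/preprocessing/executor_functions/V2_funnel_metrics_executor.py | _select_primary_exposure
-- ===== SOURCE A (Python) =====
-- EXPOSURE_PRIORITY = ["impressions", "reach", "grp"]
--
-- def _select_primary_exposure(role_map: dict, ratio_eligible: set) -> str | None:
--     exposure_cols = [
--         col for col, role in role_map.items()
--         if role == "exposure" and col in ratio_eligible
--     ]
--
--     for key in EXPOSURE_PRIORITY:
--         for col in exposure_cols:
--             if key in col.lower():
--                 return col
--
--     return exposure_cols[0] if exposure_cols else None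
-- ===== SOURCE B (Python) =====
-- EXPOSURE_PRIORITY = ["impressions", "reach", "grp"]
--
--
-- def _select_primary_exposure(role_map: dict, ratio_eligible: set) -> str | None:
--     exposure_cols = [
--         col for col, role in role_map.items()
--         if role == "exposure" and col in ratio_eligible
--     ]
--     if not exposure_cols:
--         return None
--
--     def rank(col):
--         low = col.lower()
--         return next((i for i, key in enumerate(EXPOSURE_PRIORITY) if key in low),
--                     len(EXPOSURE_PRIORITY))
--
--     return min(enumerate(exposure_cols), key=lambda p: (rank(p[1]), p[0]))[1]
-- ===== Notes on version B (the rewrite author's own statement) =====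
-- stated objective: alternative
-- what changed: Replaces the priority-major nested early-return scan with a numeric priority rank per column (first matching EXPOSURE_PRIORITY index, else its length) and a single argmin over enumerate(exposure_cols) keyed by (rank, index); the fallback to exposure_cols[0] collapses into the same selection.
import Mathlib
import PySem

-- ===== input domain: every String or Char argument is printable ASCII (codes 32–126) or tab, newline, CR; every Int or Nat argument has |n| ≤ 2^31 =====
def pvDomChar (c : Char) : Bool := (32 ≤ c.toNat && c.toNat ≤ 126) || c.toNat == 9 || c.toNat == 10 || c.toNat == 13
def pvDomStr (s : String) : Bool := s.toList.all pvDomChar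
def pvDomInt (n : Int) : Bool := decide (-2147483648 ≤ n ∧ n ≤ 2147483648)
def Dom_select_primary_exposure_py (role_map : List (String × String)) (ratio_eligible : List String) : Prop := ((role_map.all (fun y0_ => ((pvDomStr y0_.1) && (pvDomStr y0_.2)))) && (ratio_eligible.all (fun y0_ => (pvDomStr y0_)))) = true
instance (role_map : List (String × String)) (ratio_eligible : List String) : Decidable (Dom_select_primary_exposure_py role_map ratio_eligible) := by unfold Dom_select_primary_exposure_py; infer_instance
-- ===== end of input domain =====

-- B replaces A's priority-major nested early-return scan by a per-column numeric
-- priority rank and a single argmin over enumerate(exposure_cols) keyed by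
-- (rank, index); same cost, different decomposition (objective: alternative).

-- ===== PORT A =====
def pvPriority : List String := ["impressions", "reach", "grp"]

-- shared by both Pythons verbatim: the exposure_cols comprehension over role_map.items()
def pvExposureCols (role_map : List (String × String)) (ratio_eligible : List String) : List String :=
  (((PySem.Dict.ofList role_map).items.filter
      (fun p => p.2 == "exposure" && ratio_eligible.contains p.1)).map (fun p => p.1))

-- 'for col in exposure_cols: if key in col.lower(): return col'
def pvAInner (key : String) : List String → Option String
  | [] => none
  | c :: cs => if PySem.Str.isIn key (PySem.Str.lower c) then some c else pvAInner key cs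

-- 'for key in EXPOSURE_PRIORITY: …'
def pvAOuter (cols : List String) : List String → Option String
  | [] => none
  | k :: ks =>
    match pvAInner k cols with
    | some c => some c
    | none => pvAOuter cols ks

def select_primary_exposure_py (role_map : List (String × String)) (ratio_eligible : List String) : Option String :=
  let exposure_cols := pvExposureCols role_map ratio_eligible
  match pvAOuter exposure_cols pvPriority with
  | some c => some c
  | none => exposure_cols.head?   -- 'exposure_cols[0] if exposure_cols else None'

-- ===== PORT B =====
-- 'next((i for i, key in enumerate(EXPOSURE_PRIORITY) if key in low), len(EXPOSURE_PRIORITY))'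
def pvRankNext (low : String) : List (Int × String) → Int
  | [] => (pvPriority.length : Int)
  | (i, key) :: rest => if PySem.Str.isIn key low then i else pvRankNext low rest

def pvRank (col : String) : Int :=
  pvRankNext (PySem.Str.lower col) (PySem.List.enumerate pvPriority 0)

-- Python's lexicographic '<' on the 2-tuple key
def pvLexLt (a b : Int × Int) : Bool := a.1 < b.1 || (a.1 == b.1 && a.2 < b.2)

def select_primary_exposure_py_alt (role_map : List (String × String)) (ratio_eligible : List String) : Option String :=
  let exposure_cols := pvExposureCols role_map ratio_eligible
  match PySem.List.enumerate exposure_cols 0 with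
  | [] => none
  | p :: rest =>
    some ((rest.foldl (fun best q =>
      if pvLexLt (pvRank q.2, q.1) (pvRank best.2, best.1) then q else best) p).2)

-- ===== PRECONDITION & SPEC =====
def Spec_select_primary_exposure_py (role_map : List (String × String)) (ratio_eligible : List String) (out : Option String) : Prop := out = select_primary_exposure_py_alt role_map ratio_eligible
instance (role_map : List (String × String)) (ratio_eligible : List String) (out : Option String) : Decidable (Spec_select_primary_exposure_py role_map ratio_eligible out) := by unfold Spec_select_primary_exposure_py; infer_instance

-- ===== CLAIM (what is proved, stated in full; the proofs are below) =====
def Claim_equal_select_primary_exposure_py : Prop := ∀ (role_map : List (String × String)) (ratio_eligible : List String), Dom_select_primary_exposure_py role_map ratio_eligible → Spec_select_primary_exposure_py role_map ratio_eligible (select_primary_exposure_py role_map ratio_eligible)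

-- ===== LEMMAS AND PROOFS =====

-- proof-side view of A after exposure_cols is computed
def pvASel (K cols : List String) : Option String :=
  match pvAOuter cols K with
  | some c => some c
  | none => cols.head?

-- proof-side view of B after exposure_cols is computed
def pvBSel (cols : List String) : Option String :=
  match PySem.List.enumerate cols 0 with
  | [] => none
  | p :: rest =>
    some ((rest.foldl (fun best q =>
      if pvLexLt (pvRank q.2, q.1) (pvRank best.2, best.1) then q else best) p).2)

-- rank of a (lowered) column relative to a key list
def pvRk : List String → String → Nat
  | [], _ => 0
  | k :: ks, low => if PySem.Str.isIn k low then 0 else pvRk ks low + 1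

lemma pvRank_eq (c : String) :
    pvRank c = ((pvRk pvPriority (PySem.Str.lower c) : Nat) : Int) := by
  simp [pvRank, pvPriority, PySem.List.enumerate, pvRankNext, pvRk]
  split_ifs <;> simp

lemma pvLexLt_trans {a b c : Int × Int} (h1 : pvLexLt a b = true) (h2 : pvLexLt b c = true) :
    pvLexLt a c = true := by
  obtain ⟨a1, a2⟩ := a; obtain ⟨b1, b2⟩ := b; obtain ⟨c1, c2⟩ := c
  simp [pvLexLt] at *; omega

lemma pvLexLt_total {a b : Int × Int} (h : pvLexLt a b = false) :
    pvLexLt b a = true ∨ a = b := by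
  obtain ⟨a1, a2⟩ := a; obtain ⟨b1, b2⟩ := b
  simp [pvLexLt, Prod.mk.injEq] at *; omega

lemma pvAInner_eq_some {k c : String} {cols : List String} (h : pvAInner k cols = some c) :
    ∃ i, ∃ hi : i < cols.length, c = cols[i] ∧
      PySem.Str.isIn k (PySem.Str.lower cols[i]) = true ∧
      ∀ j, (hj : j < cols.length) → j < i → PySem.Str.isIn k (PySem.Str.lower cols[j]) = false := by
  induction cols with
  | nil => simp [pvAInner] at h
  | cons x xs ih =>
    by_cases hx : PySem.Str.isIn k (PySem.Str.lower x) = true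
    · refine ⟨0, by simp, ?_, by simpa using hx, by omega⟩
      simp only [pvAInner, hx, if_true, Option.some.injEq] at h; exact h.symm
    · simp only [pvAInner, hx, if_false, Bool.false_eq_true] at h
      obtain ⟨i, hi, hc, hhit, hmin⟩ := ih h
      refine ⟨i + 1, by simpa using Nat.succ_lt_succ hi, by simpa using hc, by simpa using hhit, ?_⟩
      intro j hj hji
      cases j with
      | zero => simpa using hx
      | succ j' => exact hmin j' (by simpa using hj) (by omega)

lemma pvAInner_eq_none {k : String} {cols : List String} (h : pvAInner k cols = none) :
    ∀ j, (hj : j < cols.length) → PySem.Str.isIn k (PySem.Str.lower cols[j]) = false := by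
  induction cols with
  | nil => intro j hj; simp at hj
  | cons x xs ih =>
    by_cases hx : PySem.Str.isIn k (PySem.Str.lower x) = true
    · simp only [pvAInner, hx, if_true] at h; exact absurd h (by simp)
    · simp only [pvAInner, hx, if_false, Bool.false_eq_true] at h
      intro j hj
      cases j with
      | zero => simpa using hx
      | succ j' => exact ih h j' (by simpa using hj)

-- A (loop + fallback) returns the column strictly lex-minimal in (rank, index)
lemma pvASel_char (K : List String) : ∀ (cols : List String), cols ≠ [] →
    ∃ i, ∃ hi : i < cols.length, pvASel K cols = some cols[i] ∧
      ∀ j, (hj : j < cols.length) → j ≠ i →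
        pvRk K (PySem.Str.lower cols[i]) < pvRk K (PySem.Str.lower cols[j]) ∨
        (pvRk K (PySem.Str.lower cols[i]) = pvRk K (PySem.Str.lower cols[j]) ∧ i < j) := by
  induction K with
  | nil =>
    intro cols hne
    obtain ⟨c, cs, rfl⟩ := List.exists_cons_of_ne_nil hne
    exact ⟨0, by simp, by simp [pvASel, pvAOuter], by intro j hj hji; right; simp [pvRk]; omega⟩
  | cons k ks ih =>
    intro cols hne
    cases hinner : pvAInner k cols with
    | some c =>
      obtain ⟨i, hi, rfl, hhit, hmin⟩ := pvAInner_eq_some hinner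
      refine ⟨i, hi, by simp [pvASel, pvAOuter, hinner], ?_⟩
      intro j hj hji
      by_cases hjhit : PySem.Str.isIn k (PySem.Str.lower cols[j]) = true
      · right
        refine ⟨by simp only [pvRk, hhit, hjhit]; simp, ?_⟩
        by_contra hlt
        have hcontra := hmin j hj (by omega)
        rw [hjhit] at hcontra
        exact absurd hcontra (by simp)
      · rw [Bool.not_eq_true] at hjhit
        left
        simp only [pvRk, hhit, hjhit]
        simp
    | none =>
      have hall := pvAInner_eq_none hinner
      obtain ⟨i, hi, hsel, hmin⟩ := ih cols hne
      refine ⟨i, hi, ?_, ?_⟩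
      · simpa [pvASel, pvAOuter, hinner] using hsel
      · intro j hj hji
        have h1 := hall i hi
        have h2 := hall j hj
        rcases hmin j hj hji with h | ⟨h, h'⟩
        · left; simp only [pvRk, h1, h2]; simp; omega
        · right
          refine ⟨?_, h'⟩
          simp only [pvRk, h1, h2]
          simp [h]

def pvStep (best q : Int × String) : Int × String :=
  if pvLexLt (pvRank q.2, q.1) (pvRank best.2, best.1) then q else best

-- B's running argmin: the result is a candidate no candidate is strictly below
lemma pvFold_char : ∀ (l : List (Int × String)) (b : Int × String),
    l.foldl pvStep b ∈ b :: l ∧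
    ∀ q ∈ b :: l, pvLexLt (pvRank q.2, q.1) (pvRank (l.foldl pvStep b).2, (l.foldl pvStep b).1) = false := by
  intro l
  induction l with
  | nil =>
    intro b
    refine ⟨by simp, ?_⟩
    intro x hx
    rw [List.mem_singleton] at hx
    subst hx
    simp only [List.foldl_nil]
    obtain ⟨x1, x2⟩ := x
    simp [pvLexLt]
  | cons q rest ih =>
    intro b
    rw [List.foldl_cons]
    by_cases hlt : pvLexLt (pvRank q.2, q.1) (pvRank b.2, b.1) = true
    · have hstep : pvStep b q = q := by rw [pvStep, if_pos hlt]
      rw [hstep]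
      obtain ⟨hmem, hminf⟩ := ih q
      refine ⟨List.mem_cons_of_mem b hmem, ?_⟩
      intro x hx
      rcases List.mem_cons.mp hx with hxb | hx'
      · subst hxb
        by_contra hb
        rw [Bool.not_eq_false] at hb
        have htr := pvLexLt_trans hlt hb
        have h2 := hminf q List.mem_cons_self
        rw [htr] at h2
        simp at h2
      · exact hminf x hx'
    · have hlt' : pvLexLt (pvRank q.2, q.1) (pvRank b.2, b.1) = false := by
        rw [Bool.not_eq_true] at hlt; exact hlt
      have hstep : pvStep b q = b := by rw [pvStep, if_neg (by simp [hlt'])]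
      rw [hstep]
      obtain ⟨hmem, hminf⟩ := ih b
      refine ⟨?_, ?_⟩
      · rcases List.mem_cons.mp hmem with h | h
        · exact List.mem_cons.mpr (Or.inl h)
        · exact List.mem_cons_of_mem b (List.mem_cons_of_mem q h)
      · intro x hx
        rcases List.mem_cons.mp hx with hxb | hx2
        · subst hxb
          exact hminf x List.mem_cons_self
        · rcases List.mem_cons.mp hx2 with hxq | hx3
          · subst hxq
            by_contra hq2
            rw [Bool.not_eq_false] at hq2
            have hbr := hminf b List.mem_cons_self
            rcases pvLexLt_total hlt' with h | h
            · have htr := pvLexLt_trans h hq2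
              rw [htr] at hbr
              simp at hbr
            · rw [h] at hq2
              rw [hq2] at hbr
              simp at hbr
          · exact hminf x (List.mem_cons_of_mem b hx3)

lemma pvSel_eq (cols : List String) : pvASel pvPriority cols = pvBSel cols := by
  cases hcols : cols with
  | nil => simp [pvASel, pvAOuter, pvAInner, pvBSel, pvPriority, PySem.List.enumerate]
  | cons c0 cs =>
    rw [← hcols]
    have hne : cols ≠ [] := by simp [hcols]
    obtain ⟨i, hi, hA, hAmin⟩ := pvASel_char pvPriority cols hne
    have henum : PySem.List.enumerate cols 0 = (0, c0) :: PySem.List.enumerate cs 1 := by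
      rw [hcols, PySem.List.enumerate_cons]
      norm_num
    obtain ⟨hBmem, hBmin⟩ := pvFold_char (PySem.List.enumerate cs 1) ((0 : Int), c0)
    set r := (PySem.List.enumerate cs 1).foldl pvStep ((0 : Int), c0) with hr
    have hB : pvBSel cols = some r.2 := by
      rw [pvBSel, henum]
      rfl
    have hrmem : r ∈ PySem.List.enumerate cols 0 := by rw [henum]; exact hBmem
    obtain ⟨k, hk, hrk⟩ := (PySem.List.mem_enumerate_iff _ _ _).mp hrmem
    have hiInEnum : ((0 : Int) + (i : Nat), cols[i]) ∈ PySem.List.enumerate cols 0 :=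
      (PySem.List.mem_enumerate_iff _ _ _).mpr ⟨i, hi, rfl⟩
    have himin := hBmin ((0 : Int) + (i : Nat), cols[i]) (by rw [henum] at hiInEnum; exact hiInEnum)
    have hki : k = i := by
      by_contra hne'
      have hstrict := hAmin k hk (by exact fun h => hne' h)
      rw [hrk] at himin
      rw [pvRank_eq, pvRank_eq] at himin
      simp only [pvLexLt, Bool.or_eq_false_iff, Bool.and_eq_false_iff] at himin
      rcases hstrict with h | ⟨h, h'⟩ <;>
        · simp at himin; omega
    subst hki
    rw [hA, hB, hrk]

theorem pv_main (role_map : List (String × String)) (ratio_eligible : List String) :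
    select_primary_exposure_py role_map ratio_eligible = select_primary_exposure_py_alt role_map ratio_eligible := by
  have h := pvSel_eq (pvExposureCols role_map ratio_eligible)
  simpa [select_primary_exposure_py, select_primary_exposure_py_alt, pvASel, pvBSel] using h

-- ===== VERDICT (by name: the statement is the Claim_ definition above) =====
theorem select_primary_exposure_py_spec : Claim_equal_select_primary_exposure_py := by
  intro role_map ratio_eligible _
  exact pv_main role_map ratio_eligible
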